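-- pv_equiv track=rewrite | github.com/PythonNut/dfa_learning | hankel_substring.py | generate_basis
-- ===== SOURCE A (Python) =====
-- def generate_basis(s, length_bound):
--     ''' returns list of all possible two-partitions of every word, unique prefixes for prefix indices,
--     unique suffixes for suffix indices, and all possible substrings '''
--
--     # partitions into prefixes and suffixes
--     partitions_list = []
--     all_substrings = []
--
--     for w in s:
--         # only consider partitions into prefixes and suffixes for hankell matrix indices
--         partitions_list += list(filter(lambda x: len(x) <= 2,all_partitions(w)))
--
--         # we want all possible partitions of all possible strings for the count dictionary later
--         all_substrings += all_partitions(w)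
--
--     prefixes = list(map(lambda x: x[0], partitions_list))
--
--     # all suffixes also includes case where epsilon is prefix and w is suffix
--     epsilon_prefix = list(map(lambda x: x[0], list(filter(lambda x: len(x) == 1, partitions_list))))
--     suffixes = list(map(lambda x: x[1], list(filter(lambda x: len(x)> 1, partitions_list)))) + epsilon_prefix
--
--     # we want unique prefixes and suffixes to determine our hankell matrix indices
--     unique_prefixes = sorted(list(filter(lambda x: len(x)<= length_bound, list(set(prefixes)))))
--     unique_suffixes = sorted(list(filter(lambda x: len(x)<= length_bound, list(set(suffixes)))))
--     return  (partitions_list,unique_prefixes, unique_suffixes, all_substrings)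
--
-- def all_partitions(string):
--     for cutpoints in range(1 << (len(string)-1)):
--         result = []
--         lastcut = 0
--         for i in range(len(string)-1):
--             if (1<<i) & cutpoints != 0:
--                 result.append(string[lastcut:(i+1)])
--                 lastcut = i+1
--         result.append(string[lastcut:])
--         yield result
-- ===== SOURCE B (Python) =====
-- def two_partitions(w):
--     # the partitions of w into at most two parts, in the order the cutpoint
--     # enumeration emits them: whole word first, then each split point
--     return [[w]] + [[w[:i], w[i:]] for i in range(1, len(w))]
--
--
-- def all_partitions_iter(w):
--     # all ordered partitions of w, built iteratively character by character:
--     # extending the last part comes before starting a new part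
--     parts = [[w[:1]]]
--     for ch in w[1:]:
--         parts = [p[:-1] + [p[-1] + ch] for p in parts] + [p + [ch] for p in parts]
--     return parts
--
--
-- def generate_basis(s, length_bound):
--     partitions_list = [p for w in s for p in two_partitions(w)]
--     all_substrings = [p for w in s for p in all_partitions_iter(w)]
--     pref_set = {w[:i] for w in s for i in range(1, len(w) + 1)}
--     suf_set = {w[i:] for w in s for i in range(len(w))}
--     unique_prefixes = sorted(x for x in pref_set if len(x) <= length_bound)
--     unique_suffixes = sorted(x for x in suf_set if len(x) <= length_bound)
--     return (partitions_list, unique_prefixes, unique_suffixes, all_substrings)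
-- ===== Notes on version B (the rewrite author's own statement) =====
-- stated objective: simpler
-- what changed: B replaces the 2^(n-1) cutpoint-bitmask generator plus filter with a direct O(n) enumeration of the at-most-two-part partitions, builds the full partition list iteratively character by character instead of re-slicing the word for every bitmask, and derives the unique prefix/suffix sets directly from the words instead of projecting and filtering the partition list.
import Mathlib
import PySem

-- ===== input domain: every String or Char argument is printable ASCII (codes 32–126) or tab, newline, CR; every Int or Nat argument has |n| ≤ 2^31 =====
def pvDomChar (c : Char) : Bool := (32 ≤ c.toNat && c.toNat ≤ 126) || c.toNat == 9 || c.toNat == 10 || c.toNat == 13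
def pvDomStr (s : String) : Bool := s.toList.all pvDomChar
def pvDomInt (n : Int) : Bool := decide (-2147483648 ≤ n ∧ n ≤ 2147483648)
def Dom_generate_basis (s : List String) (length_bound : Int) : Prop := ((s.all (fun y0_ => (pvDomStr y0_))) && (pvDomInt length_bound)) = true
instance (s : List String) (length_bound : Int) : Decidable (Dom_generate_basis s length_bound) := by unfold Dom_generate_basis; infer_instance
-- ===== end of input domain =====

-- B replaces the exponential cutpoint-bitmask-plus-filter enumeration by a direct O(n) listing of
-- the ≤2-part partitions, an iterative character-by-character construction of all partitions, and a
-- direct construction of the prefix/suffix sets (objective: simpler).  Return value only; no mutation.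

-- ===== PORT A =====
-- all_partitions(string): for each cutpoints bitmask, cut the word after position i+1 whenever bit i is set.
-- (1 << (len(string)-1) raises ValueError on the empty word — excluded by Pre_; the Nat subtraction here is
-- exact for len ≥ 1.)
def pvAllPartitions (string : String) : List (List String) :=
  (List.range (1 <<< (string.toList.length - 1))).map (fun cutpoints =>
    let fin := (List.range (string.toList.length - 1)).foldl
      (fun (acc : List String × Nat) i =>
        if (1 <<< i) &&& cutpoints ≠ 0 then
          (acc.1 ++ [PySem.Str.slice string (some (acc.2 : Int)) (some ((i : Int) + 1))], i + 1)
        else acc)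
      ([], 0)
    fin.1 ++ [PySem.Str.slice string (some ((fin.2 : Int))) none])

def generate_basis (s : List String) (length_bound : Int) :
    List (List String) × List String × List String × List (List String) :=
  let st := s.foldl
    (fun (acc : List (List String) × List (List String)) w =>
      (acc.1 ++ (pvAllPartitions w).filter (fun x => decide (x.length ≤ 2)),
       acc.2 ++ pvAllPartitions w))
    ([], [])
  let partitions_list := st.1
  let all_substrings := st.2
  -- x[0] / x[1]: every partition is a nonempty list (and has ≥ 2 parts where x[1] is read), so pyGetD is exact
  let prefixes := partitions_list.map (fun x => PySem.List.pyGetD x 0 "")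
  let epsilon_prefix := (partitions_list.filter (fun x => x.length == 1)).map (fun x => PySem.List.pyGetD x 0 "")
  let suffixes := (partitions_list.filter (fun x => decide (x.length > 1))).map (fun x => PySem.List.pyGetD x 1 "") ++ epsilon_prefix
  -- sorted(list(set(...))): the set's hash order is irrelevant — sorted with the identity key on distinct strings
  let unique_prefixes := PySem.List.sorted ((PySem.Set.ofList prefixes).filter (fun x => decide ((PySem.Str.len x) ≤ length_bound))) (fun x => x)
  let unique_suffixes := PySem.List.sorted ((PySem.Set.ofList suffixes).filter (fun x => decide ((PySem.Str.len x) ≤ length_bound))) (fun x => x)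
  (partitions_list, unique_prefixes, unique_suffixes, all_substrings)

-- ===== PORT B =====
def pvTwoPartitions (w : String) : List (List String) :=
  [[w]] ++ (PySem.List.pyRange 1 ((w.toList.length : Int)) 1).map
    (fun i => [PySem.Str.slice w none (some i), PySem.Str.slice w (some i) none])

-- parts = [[w[:1]]]; for ch in w[1:]: parts = [p[:-1]+[p[-1]+ch] for p in parts] + [p+[ch] for p in parts]
-- (iterating a Python str yields its one-character substrings: ch is modelled as a Char, p[-1]+ch as
-- appending String.singleton ch — exact)
def pvAllPartitionsIter (w : String) : List (List String) :=
  (PySem.Str.slice w (some 1) none).toList.foldl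
    (fun parts ch =>
      parts.map (fun p => PySem.List.slice p none (some (-1)) ++ [PySem.List.pyGetD p (-1) "" ++ String.singleton ch])
      ++ parts.map (fun p => p ++ [String.singleton ch]))
    [[PySem.Str.slice w none (some 1)]]

def generate_basis_alt (s : List String) (length_bound : Int) :
    List (List String) × List String × List String × List (List String) :=
  let partitions_list := s.flatMap (fun w => pvTwoPartitions w)
  let all_substrings := s.flatMap (fun w => pvAllPartitionsIter w)
  let pref_set := PySem.Set.ofList (s.flatMap (fun w =>
    (PySem.List.pyRange 1 ((w.toList.length : Int) + 1) 1).map (fun i => PySem.Str.slice w none (some i))))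
  let suf_set := PySem.Set.ofList (s.flatMap (fun w =>
    (PySem.List.pyRange 0 ((w.toList.length : Int)) 1).map (fun i => PySem.Str.slice w (some i) none)))
  let unique_prefixes := PySem.List.sorted (pref_set.filter (fun x => decide ((PySem.Str.len x) ≤ length_bound))) (fun x => x)
  let unique_suffixes := PySem.List.sorted (suf_set.filter (fun x => decide ((PySem.Str.len x) ≤ length_bound))) (fun x => x)
  (partitions_list, unique_prefixes, unique_suffixes, all_substrings)

-- ===== PRECONDITION & SPEC =====
-- Pre_ excludes exactly the inputs containing the empty word, on which A raises
-- ValueError (negative shift count in all_partitions).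
def Pre_generate_basis (s : List String) (length_bound : Int) : Prop := ∀ w ∈ s, w ≠ ""
instance (s : List String) (length_bound : Int) : Decidable (Pre_generate_basis s length_bound) := by
  unfold Pre_generate_basis; infer_instance
def pvWitness_generate_basis : List String × Int := (["ab", "c"], 1)

def Spec_generate_basis (s : List String) (length_bound : Int)
    (out : List (List String) × List String × List String × List (List String)) : Prop :=
  out = generate_basis_alt s length_bound
instance (s : List String) (length_bound : Int)
    (out : List (List String) × List String × List String × List (List String)) :
    Decidable (Spec_generate_basis s length_bound out) := by unfold Spec_generate_basis; infer_instance

-- ===== CLAIM (what is proved, stated in full; the proofs are below) =====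
def Claim_equal_generate_basis : Prop := ∀ (s : List String) (length_bound : Int),
  Dom_generate_basis s length_bound → Pre_generate_basis s length_bound →
  Spec_generate_basis s length_bound (generate_basis s length_bound)

-- ===== LEMMAS AND PROOFS =====

-- ---- chars-level models of the two partition enumerations ----
def cStepA (w : List Char) (c : Nat) (acc : List (List Char) × Nat) (i : Nat) : List (List Char) × Nat :=
  if (1 <<< i) &&& c ≠ 0 then (acc.1 ++ [(w.take (i+1)).drop acc.2], i+1) else acc

def cPieceA (w : List Char) (c : Nat) : List (List Char) :=
  let fin := (List.range (w.length - 1)).foldl (cStepA w c) ([], 0)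
  fin.1 ++ [w.drop fin.2]

def cPartsA (w : List Char) : List (List (List Char)) :=
  (List.range (1 <<< (w.length - 1))).map (cPieceA w)

def cExt (ch : Char) (p : List (List Char)) : List (List Char) := p.dropLast ++ [p.getLastD [] ++ [ch]]

def cStepB (parts : List (List (List Char))) (ch : Char) : List (List (List Char)) :=
  parts.map (cExt ch) ++ parts.map (· ++ [[ch]])

def cPartsB (w : List Char) : List (List (List Char)) := (w.drop 1).foldl cStepB [[w.take 1]]

theorem pv_toList_ne_nil {s : String} (h : s ≠ "") : s.toList ≠ [] := by
  intro h'
  exact h (by have := congrArg String.ofList h'; simpa using this)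

theorem pv_pyGetD_neg_one_getLastD (p : List String) (d : String) :
    PySem.List.pyGetD p (-1) d = p.getLastD d := by
  simp [PySem.List.pyGetD, PySem.List.pyGet?_neg_one, List.getLastD_eq_getLast?]

theorem pv_ofList_append_singleton (cs : List Char) (ch : Char) :
    String.ofList cs ++ String.singleton ch = String.ofList (cs ++ [ch]) := by
  apply String.toList_inj.mp; simp

theorem pv_singleton_eq_ofList (ch : Char) : String.singleton ch = String.ofList [ch] := by
  apply String.toList_inj.mp; simp

theorem pv_slice_pair (w : String) (a b : Nat) :
    PySem.Str.slice w (some (a : Int)) (some ((b : Nat) : Int)) = String.ofList ((w.toList.take b).drop a) := by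
  apply String.toList_inj.mp
  simp [PySem.Str.toList_slice, PySem.List.slice_natCast, List.drop_take]

theorem pv_slice_from (w : String) (a : Nat) :
    PySem.Str.slice w (some (a : Int)) none = String.ofList (w.toList.drop a) := by
  apply String.toList_inj.mp
  simp [PySem.Str.toList_slice, PySem.List.slice_from_natCast]

theorem pv_slice_to (w : String) (b : Nat) :
    PySem.Str.slice w none (some ((b : Nat) : Int)) = String.ofList (w.toList.take b) := by
  apply String.toList_inj.mp
  simp [PySem.Str.toList_slice, PySem.List.slice_to_natCast]

theorem pv_bit_lt {i k : Nat} (c : Nat) (hik : i < k) :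
    (1 <<< i) &&& (2 ^ k + c) = (1 <<< i) &&& c := by
  rw [Nat.one_shiftLeft, Nat.two_pow_and, Nat.two_pow_and, Nat.testBit_two_pow_add_gt hik]

theorem pv_bit_top_zero {k : Nat} {c : Nat} (h : c < 2 ^ k) : (1 <<< k) &&& c = 0 := by
  rw [Nat.one_shiftLeft, Nat.two_pow_and, Nat.testBit_lt_two_pow h]
  simp

theorem pv_bit_top_one {k : Nat} {c : Nat} (h : c < 2 ^ k) : (1 <<< k) &&& (2 ^ k + c) ≠ 0 := by
  rw [Nat.one_shiftLeft, Nat.two_pow_and, Nat.testBit_two_pow_add_eq, Nat.testBit_lt_two_pow h]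
  simp [Nat.pow_eq_zero]

theorem pv_cPieceA_eq (w : List Char) (c : Nat) :
    cPieceA w c = ((List.range (w.length - 1)).foldl (cStepA w c) ([], 0)).1 ++
      [w.drop ((List.range (w.length - 1)).foldl (cStepA w c) ([], 0)).2] := rfl

theorem pv_foldA_snd_le (w : List Char) (c : Nat) :
    ∀ (m : Nat) (acc : List (List Char) × Nat),
      ((List.range m).foldl (cStepA w c) acc).2 ≤ max acc.2 m := by
  intro m
  induction m with
  | zero => intro acc; simp
  | succ m IH =>
      intro acc
      rw [List.range_succ, List.foldl_append, List.foldl_cons, List.foldl_nil]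
      have h0 := IH acc
      unfold cStepA
      split_ifs with hb
      · show m + 1 <= max acc.2 (m+1); omega
      · exact le_trans h0 (by omega)

theorem pv_foldA_congr (v : List Char) (ch : Char) (c c' n : Nat) (hn : n ≤ v.length)
    (hbits : ∀ i < n, (1 <<< i) &&& c' = (1 <<< i) &&& c) (acc : List (List Char) × Nat) :
    (List.range n).foldl (cStepA (v ++ [ch]) c') acc =
    (List.range n).foldl (cStepA v c) acc := by
  apply PySem.List.foldl_congr_mem
  intro a i hi
  rw [List.mem_range] at hi
  unfold cStepA
  rw [hbits i hi, List.take_append_of_le_length (by omega)]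

theorem pv_cExt_concat (ch : Char) (l : List (List Char)) (x : List Char) :
    cExt ch (l ++ [x]) = l ++ [x ++ [ch]] := by
  simp [cExt, List.getLastD_eq_getLast?]

theorem pv_pieceA_low (v : List Char) (ch : Char) (c n : Nat) (hn1 : v.length = n + 1)
    (hc : c < 2 ^ n) :
    cPieceA (v ++ [ch]) c = cExt ch (cPieceA v c) := by
  have h1 : (v ++ [ch]).length - 1 = n + 1 := by simp [hn1]
  have h2 : v.length - 1 = n := by omega
  rw [pv_cPieceA_eq, pv_cPieceA_eq, h1, h2, List.range_succ, List.foldl_append,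
    List.foldl_cons, List.foldl_nil, pv_foldA_congr v ch c c n (by omega) (fun _ _ => rfl)]
  set r := (List.range n).foldl (cStepA v c) ([], 0) with hr
  have hr2 : r.2 ≤ n := by simpa using pv_foldA_snd_le v c n ([], 0)
  rw [cStepA, if_neg (by simpa using pv_bit_top_zero hc)]
  rw [List.drop_append_of_le_length (by omega), pv_cExt_concat]

theorem pv_pieceA_high (v : List Char) (ch : Char) (c n : Nat) (hn1 : v.length = n + 1)
    (hc : c < 2 ^ n) :
    cPieceA (v ++ [ch]) (2 ^ n + c) = cPieceA v c ++ [[ch]] := by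
  have h1 : (v ++ [ch]).length - 1 = n + 1 := by simp [hn1]
  have h2 : v.length - 1 = n := by omega
  rw [pv_cPieceA_eq, pv_cPieceA_eq, h1, h2, List.range_succ, List.foldl_append,
    List.foldl_cons, List.foldl_nil,
    pv_foldA_congr v ch c _ n (by omega) (fun i hi => pv_bit_lt c hi)]
  set r := (List.range n).foldl (cStepA v c) ([], 0) with hr
  have hr2 : r.2 ≤ n := by simpa using pv_foldA_snd_le v c n ([], 0)
  rw [cStepA, if_pos (pv_bit_top_one hc)]
  show (r.1 ++ [((v ++ [ch]).take (n+1)).drop r.2]) ++ [(v ++ [ch]).drop (n+1)] = _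
  rw [← hn1, List.take_left, List.drop_left]

theorem pv_partsA_step (v : List Char) (ch : Char) (hv : v ≠ []) :
    cPartsA (v ++ [ch]) = cStepB (cPartsA v) ch := by
  obtain ⟨n, hn1⟩ : ∃ n, v.length = n + 1 := by
    cases h : v.length with
    | zero => exact absurd (List.length_eq_zero_iff.mp h) hv
    | succ k => exact ⟨k, rfl⟩
  unfold cPartsA cStepB
  have h1 : (v ++ [ch]).length - 1 = n + 1 := by simp [hn1]
  have h2 : v.length - 1 = n := by omega
  rw [h1, h2]
  have hpow : 1 <<< (n + 1) = 1 <<< n + 1 <<< n := by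
    rw [Nat.one_shiftLeft, Nat.one_shiftLeft, pow_succ]; omega
  rw [hpow, List.range_add, List.map_append, List.map_map, List.map_map, List.map_map]
  congr 1
  · apply List.map_congr_left
    intro c hc
    rw [List.mem_range, Nat.one_shiftLeft] at hc
    exact pv_pieceA_low v ch c n hn1 hc
  · apply List.map_congr_left
    intro c hc
    rw [List.mem_range, Nat.one_shiftLeft] at hc
    show cPieceA (v ++ [ch]) (1 <<< n + c) = cPieceA v c ++ [[ch]]
    rw [Nat.one_shiftLeft]
    exact pv_pieceA_high v ch c n hn1 hc

theorem pv_partsA_eq_partsB (w : List Char) (hw : w ≠ []) : cPartsA w = cPartsB w := by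
  revert hw
  induction w using List.reverseRecOn with
  | nil => intro h; exact absurd rfl h
  | append_singleton v ch IH =>
      intro _
      by_cases hv : v = []
      · subst hv; rfl
      · rw [pv_partsA_step v ch hv, IH hv]
        unfold cPartsB
        rw [List.take_append_of_le_length (by have := List.length_pos_iff.mpr hv; omega),
          List.drop_append_of_le_length (by have := List.length_pos_iff.mpr hv; omega),
          List.foldl_append, List.foldl_cons, List.foldl_nil]

theorem pv_partsA_ne_nil (w : List Char) : ∀ p ∈ cPartsA w, p ≠ [] := by
  intro p hp
  rw [cPartsA, List.mem_map] at hp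
  obtain ⟨c, -, rfl⟩ := hp
  rw [pv_cPieceA_eq]
  simp

theorem pv_cExt_len (ch : Char) (p : List (List Char)) (hp : p ≠ []) :
    (cExt ch p).length = p.length := by
  have := List.length_pos_iff.mpr hp
  simp [cExt]
  omega

theorem pv_filter_le_one (w : List Char) (hw : w ≠ []) :
    (cPartsA w).filter (fun p => decide (p.length ≤ 1)) = [[w]] := by
  revert hw
  induction w using List.reverseRecOn with
  | nil => intro h; exact absurd rfl h
  | append_singleton v ch IH =>
      intro _
      by_cases hv : v = []
      · subst hv; rfl
      · rw [pv_partsA_step v ch hv]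
        unfold cStepB
        rw [List.filter_append, List.filter_map, List.filter_map]
        have hne := pv_partsA_ne_nil v
        have e1 : (cPartsA v).filter ((fun p => decide (p.length ≤ 1)) ∘ cExt ch) =
            (cPartsA v).filter (fun p => decide (p.length ≤ 1)) :=
          List.filter_congr (fun x hx => by simp [pv_cExt_len ch x (hne x hx)])
        have e2 : (cPartsA v).filter ((fun p => decide (p.length ≤ 1)) ∘ (· ++ [[ch]])) = [] := by
          apply List.filter_eq_nil_iff.mpr
          intro x hx
          have := List.length_pos_iff.mpr (hne x hx)
          simp only [Function.comp_apply, List.length_append, List.length_cons,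
            List.length_nil, decide_eq_true_eq]
          omega
        rw [e1, e2, IH hv]
        simp [cExt]

theorem pv_filter_le_two (w : List Char) (hw : w ≠ []) :
    (cPartsA w).filter (fun p => decide (p.length ≤ 2)) =
      [w] :: (List.range (w.length - 1)).map (fun k => [w.take (k+1), w.drop (k+1)]) := by
  revert hw
  induction w using List.reverseRecOn with
  | nil => intro h; exact absurd rfl h
  | append_singleton v ch IH =>
      intro _
      by_cases hv : v = []
      · subst hv; rfl
      · obtain ⟨n, hn1⟩ : ∃ n, v.length = n + 1 := by
          cases h : v.length with
          | zero => exact absurd (List.length_eq_zero_iff.mp h) hv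
          | succ k => exact ⟨k, rfl⟩
        rw [pv_partsA_step v ch hv]
        unfold cStepB
        rw [List.filter_append, List.filter_map, List.filter_map]
        have hne := pv_partsA_ne_nil v
        have e1 : (cPartsA v).filter ((fun p => decide (p.length ≤ 2)) ∘ cExt ch) =
            (cPartsA v).filter (fun p => decide (p.length ≤ 2)) :=
          List.filter_congr (fun x hx => by simp [pv_cExt_len ch x (hne x hx)])
        have e2 : (cPartsA v).filter ((fun p => decide (p.length ≤ 2)) ∘ (· ++ [[ch]])) =
            (cPartsA v).filter (fun p => decide (p.length ≤ 1)) :=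
          List.filter_congr (fun x hx => by
            simp only [Function.comp_apply, List.length_append, List.length_cons,
              List.length_nil]
            exact decide_eq_decide.mpr (by omega))
        rw [e1, e2, IH hv, pv_filter_le_one v hv]
        have h2 : (v ++ [ch]).length - 1 = n + 1 := by simp [hn1]
        have h3 : v.length - 1 = n := by omega
        rw [h2, h3, List.range_succ, List.map_cons, List.map_append, List.map_map]
        have e3 : (List.range n).map ((cExt ch) ∘ (fun k => [v.take (k+1), v.drop (k+1)])) =
            (List.range n).map (fun k => [(v ++ [ch]).take (k+1), (v ++ [ch]).drop (k+1)]) := by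
          apply List.map_congr_left
          intro k hk
          rw [List.mem_range] at hk
          simp only [Function.comp_apply, cExt]
          rw [List.take_append_of_le_length (by omega),
            List.drop_append_of_le_length (by omega)]
          simp
        have e4 : [(v ++ [ch]).take (n+1), (v ++ [ch]).drop (n+1)] = [v, [ch]] := by
          rw [← hn1, List.take_left, List.drop_left]
        rw [e3]
        simp [cExt, e4]

theorem pv_getLastD_map (l : List (List Char)) :
    (l.map String.ofList).getLastD "" = String.ofList (l.getLastD []) := by
  induction l using List.reverseRecOn with
  | nil => simp
  | append_singleton t x _ => simp [List.getLastD_eq_getLast?]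

theorem pv_bridge_A (w : String) :
    pvAllPartitions w = (cPartsA w.toList).map (List.map String.ofList) := by
  unfold pvAllPartitions cPartsA
  rw [List.map_map]
  apply List.map_congr_left
  intro c _
  show _ = List.map String.ofList (cPieceA w.toList c)
  rw [pv_cPieceA_eq]
  have H := List.foldl_hom (fun (p : List (List Char) × Nat) => (p.1.map String.ofList, p.2))
    (g₁ := cStepA w.toList c)
    (g₂ := fun (acc : List String × Nat) i =>
      if (1 <<< i) &&& c ≠ 0 then
        (acc.1 ++ [PySem.Str.slice w (some (acc.2 : Int)) (some ((i : Int) + 1))], i + 1)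
      else acc)
    (l := List.range (w.toList.length - 1)) (init := ([], 0))
    (by
      intro x i
      dsimp only [cStepA]
      split_ifs with hb
      · have hcast : ((i : Int) + 1) = (((i + 1 : Nat) : Nat) : Int) := by push_cast; ring
        rw [hcast, pv_slice_pair w x.2 (i+1), List.map_append]
        rfl
      · rfl)
  dsimp only at H
  rw [List.map_nil] at H
  show (List.foldl _ ([], 0) (List.range (w.toList.length - 1))).1 ++
    [PySem.Str.slice w (some (((List.foldl _ ([], 0) (List.range (w.toList.length - 1))).2 : Nat) : Int)) none] = _
  rw [H, pv_slice_from]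
  simp

theorem pv_bridge_B (w : String) :
    pvAllPartitionsIter w = (cPartsB w.toList).map (List.map String.ofList) := by
  unfold pvAllPartitionsIter cPartsB
  have htail : (PySem.Str.slice w (some 1) none).toList = w.toList.drop 1 := by
    simp [PySem.Str.toList_slice, PySem.List.slice_from_one]
  have hinit : PySem.Str.slice w none (some 1) = String.ofList (w.toList.take 1) := by
    simpa using pv_slice_to w 1
  rw [htail, hinit]
  have H := List.foldl_hom (fun (parts : List (List (List Char))) => parts.map (List.map String.ofList))
    (g₁ := cStepB)
    (g₂ := fun parts ch =>
      parts.map (fun p => PySem.List.slice p none (some (-1)) ++ [PySem.List.pyGetD p (-1) "" ++ String.singleton ch])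
      ++ parts.map (fun p => p ++ [String.singleton ch]))
    (l := w.toList.drop 1) (init := [[w.toList.take 1]])
    (by
      intro parts ch
      dsimp only [cStepB]
      rw [List.map_append, List.map_map, List.map_map, List.map_map, List.map_map]
      congr 1
      · apply List.map_congr_left
        intro p _
        simp only [Function.comp_apply]
        rw [PySem.List.slice_to_neg_one, pv_pyGetD_neg_one_getLastD, pv_getLastD_map,
          pv_ofList_append_singleton]
        show (List.map String.ofList p).dropLast ++ _ = _
        rw [← List.map_dropLast]
        simp [cExt]
      · apply List.map_congr_left
        intro p _
        simp only [Function.comp_apply]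
        rw [pv_singleton_eq_ofList]
        simp
    )
  dsimp only at H
  simp only [List.map_cons, List.map_nil] at H
  rw [← H]

theorem pv_bridge_two (w : String) :
    pvTwoPartitions w = ([w.toList] :: (List.range (w.toList.length - 1)).map
      (fun k => [w.toList.take (k+1), w.toList.drop (k+1)])).map (List.map String.ofList) := by
  unfold pvTwoPartitions
  rw [PySem.List.pyRange_one]
  have hlen : (((w.toList.length : Int)) - 1).toNat = w.toList.length - 1 := by omega
  rw [hlen, List.map_map, List.map_cons, List.map_map]
  have h0 : List.map String.ofList [w.toList] = [w] := by simp
  rw [h0]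
  show [[w]] ++ _ = [[w]] ++ _
  congr 1
  apply List.map_congr_left
  intro k hk
  simp only [Function.comp_apply]
  have h1 : (1 : Int) + (k : Int) = (((k + 1 : Nat) : Nat) : Int) := by push_cast; ring
  rw [h1, pv_slice_to w (k+1), pv_slice_from w (k+1)]
  simp


-- ---- the two all-partitions ports agree on nonempty words ----
theorem pv_allparts_eq (w : String) (hw : w ≠ "") : pvAllPartitions w = pvAllPartitionsIter w := by
  rw [pv_bridge_A, pv_bridge_B, pv_partsA_eq_partsB _ (pv_toList_ne_nil hw)]

theorem pv_two_eq (w : String) (hw : w ≠ "") :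
    (pvAllPartitions w).filter (fun x => decide (x.length ≤ 2)) = pvTwoPartitions w := by
  rw [pv_bridge_A, List.filter_map]
  have hc : ((fun (x : List String) => decide (x.length ≤ 2)) ∘ List.map String.ofList) =
      (fun (p : List (List Char)) => decide (p.length ≤ 2)) := by
    funext p; simp
  rw [hc, pv_filter_le_two w.toList (pv_toList_ne_nil hw), pv_bridge_two]

-- ---- sorted-set equality from membership ----
theorem pv_sorted_set_eq (xs ys : List String) (P : String → Bool)
    (h : ∀ x, x ∈ xs ↔ x ∈ ys) :
    PySem.List.sorted ((PySem.Set.ofList xs).filter P) (fun x => x) =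
    PySem.List.sorted ((PySem.Set.ofList ys).filter P) (fun x => x) := by
  apply PySem.List.sorted_eq_sorted_of_perm _ _ _ Function.injective_id
  apply (List.perm_ext_iff_of_nodup
    (List.Nodup.filter P (PySem.Set.nodup_ofList xs))
    (List.Nodup.filter P (PySem.Set.nodup_ofList ys))).mpr
  intro a
  simp [List.mem_filter, PySem.Set.mem_ofList, h a]

-- ---- evaluating x[0] / x[1] on the small partition lists ----
theorem pv_get0_pair (a b d : String) : PySem.List.pyGetD [a, b] 0 d = a := rfl
theorem pv_get0_single (a d : String) : PySem.List.pyGetD [a] 0 d = a := rfl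
theorem pv_get1_pair (a b d : String) : PySem.List.pyGetD [a, b] 1 d = b := rfl

-- ---- whole-word slices ----
theorem pv_slice_to_all (w : String) :
    PySem.Str.slice w none (some ((w.toList.length : Int))) = w := by
  rw [pv_slice_to w w.toList.length, List.take_length]
  apply String.toList_inj.mp
  simp

theorem pv_slice_from_zero (w : String) : PySem.Str.slice w (some 0) none = w := by
  have := pv_slice_from w 0
  simpa using this

-- ---- membership of the prefix lists ----
theorem pv_mem_pref_w (w : String) (hw : w ≠ "") (x : String) :
    x ∈ (pvTwoPartitions w).map (fun p => PySem.List.pyGetD p 0 "") ↔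
    x ∈ (PySem.List.pyRange 1 ((w.toList.length : Int) + 1) 1).map
      (fun i => PySem.Str.slice w none (some i)) := by
  have hlen : 1 ≤ w.toList.length := List.length_pos_iff.mpr (pv_toList_ne_nil hw)
  simp only [pvTwoPartitions, List.map_append, List.map_cons, List.map_nil, List.map_map,
    List.mem_append, List.mem_cons, List.mem_map, List.not_mem_nil, or_false,
    Function.comp_apply, pv_get0_pair, pv_get0_single, PySem.List.mem_pyRange_one]
  constructor
  · rintro (h | ⟨i, ⟨h1, h2⟩, rfl⟩)
    · exact ⟨(w.toList.length : Int), by omega, by rw [pv_slice_to_all w]; exact h.symm⟩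
    · exact ⟨i, by omega, rfl⟩
  · rintro ⟨i, ⟨h1, h2⟩, rfl⟩
    by_cases hi : i = (w.toList.length : Int)
    · subst hi
      exact Or.inl (pv_slice_to_all w)
    · exact Or.inr ⟨i, ⟨h1, by omega⟩, rfl⟩

-- ---- the two filtered projections of the two-partitions list ----
theorem pv_filter_gt1 (w : String) :
    (pvTwoPartitions w).filter (fun p => decide (p.length > 1)) =
      (PySem.List.pyRange 1 ((w.toList.length : Int)) 1).map
        (fun i => [PySem.Str.slice w none (some i), PySem.Str.slice w (some i) none]) := by
  simp [pvTwoPartitions, List.filter_map, Function.comp_def]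

theorem pv_filter_eq1 (w : String) :
    (pvTwoPartitions w).filter (fun p => p.length == 1) = [[w]] := by
  simp [pvTwoPartitions, List.filter_map, Function.comp_def]

-- ---- membership of the suffix lists ----
theorem pv_mem_suf_w (w : String) (hw : w ≠ "") (x : String) :
    (x ∈ ((PySem.List.pyRange 1 ((w.toList.length : Int)) 1).map
        (fun i => PySem.Str.slice w (some i) none)) ∨ x = w) ↔
    x ∈ (PySem.List.pyRange 0 ((w.toList.length : Int)) 1).map
      (fun i => PySem.Str.slice w (some i) none) := by
  have hlen : 1 ≤ w.toList.length := List.length_pos_iff.mpr (pv_toList_ne_nil hw)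
  simp only [List.mem_map, PySem.List.mem_pyRange_one]
  constructor
  · rintro (⟨i, ⟨h1, h2⟩, rfl⟩ | h)
    · exact ⟨i, by omega, rfl⟩
    · exact ⟨0, by omega, by rw [pv_slice_from_zero w]; exact h.symm⟩
  · rintro ⟨i, ⟨h1, h2⟩, rfl⟩
    by_cases hi : i = 0
    · subst hi
      exact Or.inr (pv_slice_from_zero w)
    · exact Or.inl ⟨i, ⟨by omega, h2⟩, rfl⟩


-- ===== VERDICT (by name: the statement is the Claim_ definition above) =====
theorem generate_basis_spec : Claim_equal_generate_basis := by
  intro s lb _ hpre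
  unfold Spec_generate_basis generate_basis generate_basis_alt
  have hPL : (s.foldl (fun (acc : List (List String) × List (List String)) w =>
      (acc.1 ++ (pvAllPartitions w).filter (fun x => decide (x.length ≤ 2)),
       acc.2 ++ pvAllPartitions w)) ([], [])) =
      (s.flatMap (fun w => pvTwoPartitions w), s.flatMap (fun w => pvAllPartitionsIter w)) := by
    rw [PySem.List.foldl_prod_mk
      (f := fun acc w => acc ++ (pvAllPartitions w).filter (fun x => decide (x.length ≤ 2)))
      (g := fun acc w => acc ++ pvAllPartitions w),
      PySem.List.foldl_append_eq_flatMap, PySem.List.foldl_append_eq_flatMap,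
      List.nil_append, List.nil_append, List.flatMap_def, List.flatMap_def,
      List.map_congr_left (fun w hw => pv_two_eq w (hpre w hw)),
      List.map_congr_left (fun w hw => pv_allparts_eq w (hpre w hw)),
      ← List.flatMap_def, ← List.flatMap_def]
  rw [hPL]
  simp only [Prod.mk.injEq, true_and, and_true]
  refine ⟨?_, ?_⟩
  · -- unique prefixes
    apply pv_sorted_set_eq
    intro x
    rw [List.map_flatMap, List.mem_flatMap, List.mem_flatMap]
    constructor
    · rintro ⟨w, hw, hx⟩
      exact ⟨w, hw, (pv_mem_pref_w w (hpre w hw) x).mp hx⟩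
    · rintro ⟨w, hw, hx⟩
      exact ⟨w, hw, (pv_mem_pref_w w (hpre w hw) x).mpr hx⟩
  · -- unique suffixes
    apply pv_sorted_set_eq
    intro x
    rw [List.filter_flatMap, List.filter_flatMap, List.map_flatMap, List.map_flatMap,
      List.mem_append, List.mem_flatMap, List.mem_flatMap, List.mem_flatMap]
    constructor
    · rintro (⟨w, hw, hx⟩ | ⟨w, hw, hx⟩)
      · rw [pv_filter_gt1, List.map_map] at hx
        refine ⟨w, hw, (pv_mem_suf_w w (hpre w hw) x).mp (Or.inl ?_)⟩
        simpa [pv_get1_pair] using hx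
      · rw [pv_filter_eq1] at hx
        simp only [List.map_cons, List.map_nil, pv_get0_single, List.mem_cons,
          List.not_mem_nil, or_false] at hx
        exact ⟨w, hw, (pv_mem_suf_w w (hpre w hw) x).mp (Or.inr hx)⟩
    · rintro ⟨w, hw, hx⟩
      rcases (pv_mem_suf_w w (hpre w hw) x).mpr hx with h | h
      · refine Or.inl ⟨w, hw, ?_⟩
        rw [pv_filter_gt1, List.map_map]
        simpa [pv_get1_pair] using h
      · refine Or.inr ⟨w, hw, ?_⟩
        rw [pv_filter_eq1]
        simp [h]
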